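-- pv_equiv track=rewrite | github.com/AndriiBanduliak/Softseve_2023-2024 | PYTHON PRACTICAL/tasks/task1.py | double_string
-- ===== SOURCE A (Python) =====
-- def double_string(data):
--     # Convert the list to a set for quick lookups
--     string_set = set(data)
--     counter = 0
--
--     # Iterate over each string in the list
--     for s in data:
--         # Try every possible split of the string into two non-empty substrings
--         for i in range(1, len(s)):  # i is the split point
--             part1 = s[:i]
--             part2 = s[i:]
--             # If both parts exist in the set, we count this string
--             if part1 in string_set and part2 in string_set:
--                 counter += 1
--                 break  # Stop checking once we find a valid split for this string
--
--     return counter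
-- ===== SOURCE B (Python) =====
-- def double_string(data):
--     words = set(data)
--     # candidate split points: only lengths of nonempty words can be prefix lengths
--     lens = sorted({len(w) for w in words if w})
--     count = 0
--     for s in data:
--         if any(l < len(s) and s[:l] in words and s[l:] in words for l in lens):
--             count += 1
--     return count
-- ===== Notes on version B (the rewrite author's own statement) =====
-- stated objective: alternative
-- what changed: Instead of trying every split position of each string, B precomputes the sorted set of distinct lengths of nonempty words and tests only those candidate prefix lengths as split points.
import Mathlib
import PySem

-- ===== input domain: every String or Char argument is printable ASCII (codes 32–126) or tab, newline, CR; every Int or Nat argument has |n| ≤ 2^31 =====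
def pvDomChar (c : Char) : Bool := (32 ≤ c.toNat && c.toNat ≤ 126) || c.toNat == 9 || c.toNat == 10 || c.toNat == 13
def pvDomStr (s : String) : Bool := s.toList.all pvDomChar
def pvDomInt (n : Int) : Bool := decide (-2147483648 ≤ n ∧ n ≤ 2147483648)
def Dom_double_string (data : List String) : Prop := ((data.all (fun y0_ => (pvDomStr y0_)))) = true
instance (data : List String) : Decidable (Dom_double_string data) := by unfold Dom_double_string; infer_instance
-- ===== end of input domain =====

-- B tries only the distinct lengths of nonempty words in the set as split points of each
-- string, instead of every split position; an alternative with the same worst-case cost.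

-- ===== PORT A =====
def double_string (data : List String) : Int :=
  let string_set := PySem.Set.ofList data
  data.foldl (fun counter s =>
    if (PySem.List.pyRange 1 (PySem.Str.len s) 1).any (fun i =>
        PySem.Set.contains string_set (PySem.Str.slice s none (some i)) &&
        PySem.Set.contains string_set (PySem.Str.slice s (some i) none))
    then counter + 1 else counter) 0

-- ===== PORT B =====
def double_string_alt (data : List String) : Int :=
  let words := PySem.Set.ofList data
  let lens := PySem.List.sorted
    (PySem.Set.ofList ((words.filter (fun w => !(w == ""))).map PySem.Str.len))
    (fun x => x) false
  data.foldl (fun count s =>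
    if lens.any (fun l =>
        decide (l < PySem.Str.len s) &&
        PySem.Set.contains words (PySem.Str.slice s none (some l)) &&
        PySem.Set.contains words (PySem.Str.slice s (some l) none))
    then count + 1 else count) 0

-- ===== PRECONDITION & SPEC =====
def Spec_double_string (data : List String) (out : Int) : Prop := out = double_string_alt data
instance (data : List String) (out : Int) : Decidable (Spec_double_string data out) := by unfold Spec_double_string; infer_instance

-- ===== CLAIM (what is proved, stated in full; the proofs are below) =====
def Claim_equal_double_string : Prop := ∀ (data : List String), Dom_double_string data → Spec_double_string data (double_string data)

-- ===== LEMMAS AND PROOFS =====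

lemma len_slice_to (s : String) (i : Int) (h0 : 0 ≤ i) (h1 : i ≤ (s.toList.length : Int)) :
  PySem.Str.len (PySem.Str.slice s none (some i)) = i := by
  simp only [pysem, PySem.List.slice_to s.toList h0, List.length_take]
  omega

lemma len_pos_of_ne_empty (w : String) (h : ¬ w = "") : 1 ≤ PySem.Str.len w := by
  rw [PySem.Str.len_eq]
  rcases Nat.eq_zero_or_pos w.toList.length with h0 | h0
  · exact absurd (by
      have h2 : w.toList = [] := List.length_eq_zero_iff.mp h0
      have h3 : w.toList = ("" : String).toList := by simpa using h2
      exact String.toList_injective h3) h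
  · omega

-- For each string s: some split point 1 ≤ i < len s with both parts in the set exists
-- iff some word-length split point works — a valid prefix's length is a nonempty word's length.
lemma pv_inner_eq (data : List String) (s : String) :
    ((PySem.List.pyRange 1 (PySem.Str.len s) 1).any (fun i =>
        PySem.Set.contains (PySem.Set.ofList data) (PySem.Str.slice s none (some i)) &&
        PySem.Set.contains (PySem.Set.ofList data) (PySem.Str.slice s (some i) none)))
    = ((PySem.List.sorted
          (PySem.Set.ofList (((PySem.Set.ofList data).filter (fun w => !(w == ""))).map PySem.Str.len))
          (fun x => x) false).any (fun l =>
        decide (l < PySem.Str.len s) &&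
        PySem.Set.contains (PySem.Set.ofList data) (PySem.Str.slice s none (some l)) &&
        PySem.Set.contains (PySem.Set.ofList data) (PySem.Str.slice s (some l) none))) := by
  rw [Bool.eq_iff_iff]
  simp only [List.any_eq_true, PySem.List.mem_pyRange_one, PySem.List.mem_sorted,
    PySem.Set.mem_ofList, List.mem_map, List.mem_filter, Bool.and_eq_true, decide_eq_true_eq,
    Bool.not_eq_eq_eq_not, Bool.not_true, beq_eq_false_iff_ne, ne_eq]
  constructor
  · rintro ⟨i, ⟨h1, h2⟩, hpre, hsuf⟩
    have h0 : (0:Int) ≤ i := by omega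
    have hle : i ≤ (s.toList.length : Int) := by
      rw [PySem.Str.len_eq] at h2; omega
    have hlen : PySem.Str.len (PySem.Str.slice s none (some i)) = i :=
      len_slice_to s i h0 hle
    refine ⟨i, ⟨PySem.Str.slice s none (some i), ⟨?_, ?_⟩, hlen⟩, ⟨h2, hpre⟩, hsuf⟩
    · exact (PySem.Set.mem_ofList data _).mp ((PySem.Set.contains_iff _ _).mp hpre)
    · intro hempty
      rw [hempty] at hlen
      have hz : PySem.Str.len "" = 0 := by decide
      omega
  · rintro ⟨l, ⟨w, ⟨hwmem, hwne⟩, hwl⟩, ⟨hlt, hpre⟩, hsuf⟩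
    have h1 : (1:Int) ≤ l := hwl ▸ len_pos_of_ne_empty w hwne
    exact ⟨l, ⟨h1, hlt⟩, hpre, hsuf⟩

-- ===== VERDICT (by name: the statement is the Claim_ definition above) =====
theorem double_string_spec : Claim_equal_double_string := by
  intro data _
  unfold Spec_double_string double_string double_string_alt
  simp only
  congr 1
  funext c s
  rw [pv_inner_eq]
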